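-- pv_equiv track=rewrite | github.com/hoodee86/agent-hack | src/linux_agent/policy.py | _matches_command_prefix
-- ===== SOURCE A (Python) =====
-- def _matches_command_prefix(command: str, patterns: list[str] | frozenset[str]) -> bool:
--     for pattern in patterns:
--         normalized = pattern.strip()
--         if not normalized:
--             continue
--         if command == normalized or command.startswith(f"{normalized} "):
--             return True
--     return False
-- ===== SOURCE B (Python) =====
-- def _matches_command_prefix(command: str, patterns: list[str] | frozenset[str]) -> bool:
--     # Build once the set of strings that can match: the whole command, plus
--     # every prefix of it that is cut off right before a space.
--     prefixes = {command}
--     for i, ch in enumerate(command):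
--         if ch == ' ':
--             prefixes.add(command[:i])
--     for pattern in patterns:
--         normalized = pattern.strip()
--         if normalized and normalized in prefixes:
--             return True
--     return False
-- ===== Notes on version B (the rewrite author's own statement) =====
-- stated objective: alternative
-- what changed: B precomputes once the set of space-delimited prefixes of the command and tests each stripped pattern by set membership, instead of re-scanning the command with startswith for every pattern.
import Mathlib
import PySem

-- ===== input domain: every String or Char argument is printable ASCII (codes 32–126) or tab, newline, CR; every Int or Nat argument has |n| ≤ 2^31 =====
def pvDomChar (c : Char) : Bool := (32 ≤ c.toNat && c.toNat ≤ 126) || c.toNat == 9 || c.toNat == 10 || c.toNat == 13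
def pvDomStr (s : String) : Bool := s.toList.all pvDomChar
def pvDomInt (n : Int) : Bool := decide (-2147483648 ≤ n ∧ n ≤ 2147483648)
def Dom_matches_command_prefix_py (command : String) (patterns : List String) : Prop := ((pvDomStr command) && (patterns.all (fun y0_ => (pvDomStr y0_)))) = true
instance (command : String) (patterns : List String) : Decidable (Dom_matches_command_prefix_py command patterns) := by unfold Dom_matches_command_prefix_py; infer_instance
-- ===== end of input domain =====

-- B builds the set of space-delimited prefixes of the command once and tests each stripped
-- pattern by set membership, instead of a startswith scan per pattern (alternative decomposition).


-- ===== PORT A =====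
-- the 'for pattern in patterns' loop with continue / early return
def pvLoopA (cs : List Char) : List String → Bool
  | [] => false
  | p :: rest =>
      let normalized := PySem.Chars.strip p.toList
      if normalized = [] then pvLoopA cs rest
      else if cs = normalized ∨ PySem.Chars.startswith cs (normalized ++ [' ']) = true then true
      else pvLoopA cs rest

def matches_command_prefix_py (command : String) (patterns : List String) : Bool :=
  pvLoopA command.toList patterns

-- ===== PORT B =====
-- prefixes = {command} ∪ {command[:i] | command[i] == ' '}  (a Python set)
def pvPrefixes (cs : List Char) : List (List Char) :=
  PySem.Set.ofList
    (cs :: (PySem.List.enumerate cs 0).filterMap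
      (fun q => if q.2 = ' ' then some (cs.take q.1.toNat) else none))

-- the pattern loop of B: membership in the precomputed set
def pvLoopB (S : List (List Char)) : List String → Bool
  | [] => false
  | p :: rest =>
      let normalized := PySem.Chars.strip p.toList
      if normalized ≠ [] ∧ normalized ∈ S then true
      else pvLoopB S rest

def matches_command_prefix_py_alt (command : String) (patterns : List String) : Bool :=
  pvLoopB (pvPrefixes command.toList) patterns

-- ===== PRECONDITION & SPEC =====
def Spec_matches_command_prefix_py (command : String) (patterns : List String) (out : Bool) : Prop := out = matches_command_prefix_py_alt command patterns
instance (command : String) (patterns : List String) (out : Bool) : Decidable (Spec_matches_command_prefix_py command patterns out) := by unfold Spec_matches_command_prefix_py; infer_instance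

-- ===== CLAIM (what is proved, stated in full; the proofs are below) =====
def Claim_equal_matches_command_prefix_py : Prop := ∀ (command : String) (patterns : List String), Dom_matches_command_prefix_py command patterns → Spec_matches_command_prefix_py command patterns (matches_command_prefix_py command patterns)

-- ===== LEMMAS AND PROOFS =====

-- the per-pattern condition of A is exactly membership in B's prefix set
theorem mem_pvPrefixes_iff (cs n : List Char) :
    n ∈ pvPrefixes cs ↔ (n = cs ∨ (n ++ [' ']) <+: cs) := by
  unfold pvPrefixes
  rw [PySem.Set.mem_ofList]
  simp only [List.mem_cons, List.mem_filterMap, PySem.List.mem_enumerate_iff]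
  constructor
  · rintro (rfl | ⟨q, ⟨k, hk, rfl⟩, hif⟩)
    · exact Or.inl rfl
    · simp only [zero_add, Int.toNat_natCast] at hif
      split at hif
      · rename_i hsp
        injection hif with h
        subst h
        refine Or.inr ?_
        have hstep : cs.take k ++ [' '] = cs.take (k + 1) := by
          rw [List.take_add_one]
          simp [List.getElem?_eq_getElem hk, hsp]
        rw [hstep]
        exact List.take_prefix _ _
      · exact absurd hif (by simp)
  · rintro (rfl | ⟨t, ht⟩)
    · exact Or.inl rfl
    · subst ht
      refine Or.inr ⟨((n.length : Int), ' '), ⟨n.length, ?_, ?_⟩, ?_⟩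
      · simp
      · refine Prod.ext (by simp) ?_
        simp [List.append_assoc, List.getElem_append_right (Nat.le_refl n.length)]
      · simp

-- the two loops agree
theorem loops_eq (cs : List Char) (ps : List String) :
    pvLoopA cs ps = pvLoopB (pvPrefixes cs) ps := by
  induction ps with
  | nil => rfl
  | cons p rest ih =>
    simp only [pvLoopA, pvLoopB]
    by_cases hn : PySem.Chars.strip p.toList = []
    · simp [hn, ih]
    · rw [if_neg hn]
      by_cases hc : cs = PySem.Chars.strip p.toList ∨
          PySem.Chars.startswith cs (PySem.Chars.strip p.toList ++ [' ']) = true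
      · rw [if_pos hc, if_pos]
        refine ⟨hn, ?_⟩
        rw [mem_pvPrefixes_iff]
        rcases hc with h | h
        · exact Or.inl h.symm
        · exact Or.inr ((PySem.Chars.startswith_iff _ _).mp h)
      · rw [if_neg hc, if_neg, ih]
        rintro ⟨-, hmem⟩
        rw [mem_pvPrefixes_iff] at hmem
        apply hc
        rcases hmem with h | h
        · exact Or.inl h.symm
        · exact Or.inr ((PySem.Chars.startswith_iff _ _).mpr h)

-- ===== VERDICT (by name: the statement is the Claim_ definition above) =====
theorem matches_command_prefix_py_spec : Claim_equal_matches_command_prefix_py := by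
  intro command patterns _
  unfold Spec_matches_command_prefix_py matches_command_prefix_py matches_command_prefix_py_alt
  exact loops_eq command.toList patterns
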